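-- pv_equiv track=rewrite | github.com/ftfuture/InsiteChart | backend/services/data_transformer.py | _merge_community_breakdown
-- ===== SOURCE A (Python) =====
-- from typing import Dict, List, Optional, Any, Union
--
-- def _merge_community_breakdown(base: Dict[str, int],
--                              update: Dict[str, int]) -> Dict[str, int]:
--     """Merge community breakdown dictionaries."""
--     merged = {}
--
--     # Add base communities
--     for community, count in base.items():
--         merged[community] = count
--
--     # Add/update with update communities
--     for community, count in update.items():
--         merged[community] = merged.get(community, 0) + count
--
--     return merged
-- ===== SOURCE B (Python) =====
-- def _merge_community_breakdown(base, update):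
--     """Merge community breakdown dictionaries without a running accumulator:
--     flatten both dicts into one pair list, take keys in first-occurrence
--     order, and total each key by summing its matching values in the flat list."""
--     pairs = list(base.items()) + list(update.items())
--     order = list(dict.fromkeys(k for k, _ in pairs))
--     return {k: sum(v for kk, v in pairs if kk == k) for k in order}
-- ===== Notes on version B (the rewrite author's own statement) =====
-- stated objective: alternative
-- what changed: A maintains a mutable accumulator dict (copy base, then patch entry by entry with get-default); B maintains no accumulator at all: it flattens both dicts into one pair list, dedupes keys by first occurrence, and computes each total by summing that key's matches in the flat list.
import Mathlib
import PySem

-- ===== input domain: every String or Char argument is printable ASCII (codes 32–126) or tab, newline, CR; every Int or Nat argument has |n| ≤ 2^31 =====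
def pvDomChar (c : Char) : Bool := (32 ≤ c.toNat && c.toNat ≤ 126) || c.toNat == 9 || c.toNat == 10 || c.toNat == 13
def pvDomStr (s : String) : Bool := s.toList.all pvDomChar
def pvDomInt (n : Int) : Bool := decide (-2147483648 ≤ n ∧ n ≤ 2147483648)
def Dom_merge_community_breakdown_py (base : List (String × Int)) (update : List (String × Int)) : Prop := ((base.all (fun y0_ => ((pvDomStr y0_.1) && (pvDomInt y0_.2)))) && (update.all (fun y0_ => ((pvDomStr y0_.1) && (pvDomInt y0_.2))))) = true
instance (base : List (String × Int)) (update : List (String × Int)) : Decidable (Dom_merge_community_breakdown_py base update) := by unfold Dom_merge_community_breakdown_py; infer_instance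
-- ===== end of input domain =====

-- B replaces A's mutable accumulator dict (copy base, patch with update via get-default) by a
-- flat pair list: keys in first-occurrence order, each total a sum over the flat list (objective: alternative).

-- ===== PORT A =====
-- merged = {}; for community, count in base.items(): merged[community] = count
-- for community, count in update.items(): merged[community] = merged.get(community, 0) + count
def merge_community_breakdown_py (base : List (String × Int)) (update : List (String × Int)) : List (String × Int) :=
  let bd := PySem.Dict.ofList base
  let ud := PySem.Dict.ofList update
  let merged := bd.items.foldl (fun d p => d.insert p.1 p.2) PySem.Dict.empty
  let merged := ud.items.foldl (fun d p => d.insert p.1 (d.getD p.1 0 + p.2)) merged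
  merged.items

-- ===== PORT B =====
-- pairs = list(base.items()) + list(update.items())
-- order = list(dict.fromkeys(k for k, _ in pairs))
-- return {k: sum(v for kk, v in pairs if kk == k) for k in order}   (order has distinct keys: the comprehension IS this list)
def merge_community_breakdown_py_alt (base : List (String × Int)) (update : List (String × Int)) : List (String × Int) :=
  let bd := PySem.Dict.ofList base
  let ud := PySem.Dict.ofList update
  let pairs := bd.items ++ ud.items
  let order := PySem.List.dedup (pairs.map (·.1))
  order.map (fun k => (k, ((pairs.filter (fun q => q.1 == k)).map (·.2)).sum))

-- ===== PRECONDITION & SPEC =====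
def Spec_merge_community_breakdown_py (base : List (String × Int)) (update : List (String × Int)) (out : List (String × Int)) : Prop := out = merge_community_breakdown_py_alt base update
instance (base : List (String × Int)) (update : List (String × Int)) (out : List (String × Int)) : Decidable (Spec_merge_community_breakdown_py base update out) := by unfold Spec_merge_community_breakdown_py; infer_instance

-- ===== CLAIM (what is proved, stated in full; the proofs are below) =====
def Claim_equal_merge_community_breakdown_py : Prop := ∀ (base : List (String × Int)) (update : List (String × Int)), Dom_merge_community_breakdown_py base update → Spec_merge_community_breakdown_py base update (merge_community_breakdown_py base update)

-- ===== LEMMAS AND PROOFS =====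

-- A's first loop rebuilds bd from its own items.
theorem foldl_insert_items_eq {κ ν : Type} [BEq κ] [LawfulBEq κ] (d : PySem.Dict κ ν)
    (h : d.keys.Nodup) :
    d.items.foldl (fun a p => a.insert p.1 p.2) PySem.Dict.empty = d := by
  apply PySem.Dict.ext
  rw [PySem.Dict.items_foldl_insert_fresh (d := (PySem.Dict.empty : PySem.Dict κ ν))
    (l := d.items) (k := fun p => p.1) (v := fun p => p.2)
    (by intro a _; exact PySem.Dict.contains_empty a.1) h]
  show PySem.Dict.empty.items ++ d.items.map (fun a => (a.1, a.2)) = d.items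
  simp [PySem.Dict.empty]

-- getD through A's second loop: each pair with key k adds its value.
theorem getD_foldl_insert_getD_add {κ : Type} [BEq κ] [LawfulBEq κ]
    (l : List (κ × Int)) (d : PySem.Dict κ Int) (k : κ) :
    (l.foldl (fun a p => a.insert p.1 (a.getD p.1 0 + p.2)) d).getD k 0
      = d.getD k 0 + ((l.filter (fun p => p.1 == k)).map (·.2)).sum := by
  induction l generalizing d with
  | nil => simp
  | cons p rest ih =>
    simp only [List.foldl_cons, ih, List.filter_cons]
    by_cases hk : p.1 = k
    · subst hk
      simp [PySem.Dict.getD_insert_self]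
      ring
    · have hb : (p.1 == k) = false := by simpa using hk
      rw [PySem.Dict.getD_insert_of_ne d _ _ (fun h => hk h.symm)]
      simp [hb]

-- on a dict with Nodup keys the filtered-values sum at k is getD k 0
theorem sum_filter_items_eq_getD {κ : Type} [BEq κ] [LawfulBEq κ]
    (l : List (κ × Int)) (hnd : (l.map (·.1)).Nodup) (k : κ) :
    ((l.filter (fun p => p.1 == k)).map (·.2)).sum = (PySem.Dict.mk l).getD k 0 := by
  induction l with
  | nil => simp [PySem.Dict.getD_eq_get?_getD, PySem.Dict.get?]
  | cons p rest ih =>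
    obtain ⟨pk, pv⟩ := p
    simp only [List.map_cons, List.nodup_cons] at hnd
    by_cases hk : pk = k
    · have hrest : rest.filter (fun q => q.1 == k) = [] := by
        apply List.filter_eq_nil_iff.mpr
        intro q hq hq1
        apply hnd.1
        have : q.1 = pk := by rw [eq_of_beq hq1, hk]
        exact this ▸ List.mem_map_of_mem hq
      have hb : (pk == k) = true := by simpa using hk
      simp [hrest, hb, PySem.Dict.getD_eq_get?_getD, PySem.Dict.get?_mk_cons]
    · have hb : (pk == k) = false := by simpa using hk
      have hstep : (PySem.Dict.mk ((pk, pv) :: rest)).getD k 0 = (PySem.Dict.mk rest).getD k 0 := by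
        simp [PySem.Dict.getD_eq_get?_getD, PySem.Dict.get?_mk_cons, hb]
      rw [hstep]
      simpa [List.filter_cons, hb] using ih hnd.2

theorem merge_lemma (base update : List (String × Int)) :
    merge_community_breakdown_py base update = merge_community_breakdown_py_alt base update := by
  unfold merge_community_breakdown_py merge_community_breakdown_py_alt
  dsimp only
  set bd := PySem.Dict.ofList base with hbd
  set ud := PySem.Dict.ofList update with hud
  have hbn : bd.keys.Nodup := PySem.Dict.nodup_keys_ofList base
  have hun : ud.keys.Nodup := PySem.Dict.nodup_keys_ofList update
  have hbk : bd.items.map (·.1) = bd.keys := rfl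
  have huk : ud.items.map (·.1) = ud.keys := rfl
  rw [foldl_insert_items_eq bd hbn]
  set merged := ud.items.foldl (fun d p => d.insert p.1 (d.getD p.1 0 + p.2)) bd with hm
  -- the target key order of both sides
  have horder : PySem.List.dedup ((bd.items ++ ud.items).map (·.1))
      = bd.keys ++ ud.keys.filter (fun k => !(bd.contains k)) := by
    rw [List.map_append, hbk, huk, PySem.List.dedup_eq_ofList, PySem.Set.ofList_append,
        PySem.Set.ofList_eq_self_of_nodup bd.keys hbn, PySem.Set.update_eq_append_filter,
        PySem.Set.ofList_eq_self_of_nodup ud.keys hun]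
    congr 1
    apply List.filter_congr
    intro k _
    have : PySem.Set.contains bd.keys k = bd.contains k := by
      rw [PySem.Dict.contains_eq_decide_mem_keys]
      simp [PySem.Set.contains_eq_listContains]
    rw [this]
  have hkeys : merged.keys = bd.keys ++ ud.keys.filter (fun k => !(bd.contains k)) := by
    have h1 := PySem.Dict.keys_foldl_insert_key (l := ud.items) (key := fun p => p.1)
      (f := fun d p => d.getD p.1 0 + p.2) (d := bd)
    rw [hm, h1, huk, PySem.Set.update_eq_append_filter,
        PySem.Set.ofList_eq_self_of_nodup ud.keys hun]
    congr 1
    apply List.filter_congr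
    intro k _
    have : PySem.Set.contains bd.keys k = bd.contains k := by
      rw [PySem.Dict.contains_eq_decide_mem_keys]
      simp [PySem.Set.contains_eq_listContains]
    rw [this]
  have hmn : merged.keys.Nodup := by
    rw [hm]
    exact PySem.Dict.nodup_keys_foldl_insert_key ud.items (fun p => p.1) _ bd hbn
  -- B's per-key total splits into the two dicts' getD values = merged's getD
  have hval : ∀ k, merged.getD k 0
      = (((bd.items ++ ud.items).filter (fun q => q.1 == k)).map (·.2)).sum := by
    intro k
    rw [hm, getD_foldl_insert_getD_add, List.filter_append, List.map_append, List.sum_append]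
    congr 1
    have hb : (PySem.Dict.mk bd.items) = bd := rfl
    rw [← hb] at *
    exact (sum_filter_items_eq_getD bd.items (by simpa [hbk] using hbn) k).symm
  rw [PySem.Dict.items_eq_map_keys merged hmn 0, hkeys, horder]
  apply List.map_congr_left
  intro k _
  rw [hval k]

-- ===== VERDICT (by name: the statement is the Claim_ definition above) =====
theorem merge_community_breakdown_py_spec : Claim_equal_merge_community_breakdown_py := by
  intro base update _
  unfold Spec_merge_community_breakdown_py
  exact merge_lemma base update
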